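-- pv_equiv track=rewrite | github.com/oscarlaaaa/fun-algo-stuff | LeetCode/Medium/2294_Partition_Array_Such_That_Maximum_Difference_Is_K/Solution.py | partitionArray
-- ===== SOURCE A (Python) =====
-- from typing import List
--
-- def partitionArray(nums: List[int], k: int) -> int:
--     min_val, max_val = nums[0], nums[0]
--     buckets = set()
--     for num in nums:
--         buckets.add(num)
--         min_val = min(min_val, num)
--         max_val = max(max_val, num)
--
--     subsequences = 1
--     last_min = min_val
--     for num in range(min_val, max_val+1):
--         if num not in buckets:
--             continue
--
--         if num - last_min <= k:
--             continue
--
--         subsequences += 1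
--         last_min = num
--
--     return subsequences
-- ===== SOURCE B (Python) =====
-- def partitionArray(nums, k):
--     vals = sorted(set(nums))
--     count = 1
--     last = vals[0]
--     for v in vals:
--         if v - last > k:
--             count += 1
--             last = v
--     return count
-- ===== Notes on version B (the rewrite author's own statement) =====
-- stated objective: faster
-- what changed: Replaces the scan over every integer in [min,max] with membership tests by a single greedy pass over the sorted distinct values, O(n log n) instead of O(n + (max-min)).
-- outside the precondition, e.g. on partitionArray([], 0): A raises IndexError, B raises IndexError
import Mathlib
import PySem

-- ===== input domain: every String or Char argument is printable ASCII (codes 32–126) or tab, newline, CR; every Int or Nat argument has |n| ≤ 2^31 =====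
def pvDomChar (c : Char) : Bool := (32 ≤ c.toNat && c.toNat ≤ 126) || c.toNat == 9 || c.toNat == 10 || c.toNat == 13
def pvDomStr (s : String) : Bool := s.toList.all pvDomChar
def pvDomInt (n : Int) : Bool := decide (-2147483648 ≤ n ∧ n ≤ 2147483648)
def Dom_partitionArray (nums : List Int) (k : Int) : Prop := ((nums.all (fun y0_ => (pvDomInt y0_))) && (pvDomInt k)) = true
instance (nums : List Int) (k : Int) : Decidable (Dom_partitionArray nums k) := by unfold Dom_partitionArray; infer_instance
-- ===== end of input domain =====

-- B replaces A's scan over every integer in [min,max] by one greedy pass over the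
-- sorted distinct values (asymptotically faster when the value range is wide).

-- ===== PORT A =====
def partitionArray (nums : List Int) (k : Int) : Int :=
  match PySem.List.pyGet? nums 0 with
  | none => 0  -- nums[0] raises IndexError; excluded by Pre_
  | some h =>
    -- for num in nums: buckets.add(num); min_val = min(...); max_val = max(...)
    let st := nums.foldl
      (fun (s : PySem.Set Int × Int × Int) num =>
        (PySem.Set.add s.1 num, min s.2.1 num, max s.2.2 num))
      (PySem.Set.empty, h, h)
    -- for num in range(min_val, max_val+1): ...
    let r := (PySem.List.pyRange st.2.1 (st.2.2 + 1) 1).foldl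
      (fun (s : Int × Int) num =>
        if !(PySem.Set.contains st.1 num) then s
        else if num - s.2 ≤ k then s
        else (s.1 + 1, num))
      (1, st.2.1)
    r.1

-- ===== PORT B =====
def partitionArray_alt (nums : List Int) (k : Int) : Int :=
  let vals := PySem.List.sorted (PySem.Set.ofList nums) (fun x => x) false
  match vals with
  | [] => 0  -- vals[0] raises IndexError; excluded by Pre_
  | v0 :: _ =>
    (vals.foldl (fun (s : Int × Int) v =>
      if v - s.2 > k then (s.1 + 1, v) else s) (1, v0)).1

-- ===== PRECONDITION & SPEC =====
-- A evaluates nums[0]: it raises IndexError exactly on the empty list.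
def Pre_partitionArray (nums : List Int) (k : Int) : Prop := nums ≠ []
instance (nums : List Int) (k : Int) : Decidable (Pre_partitionArray nums k) := by
  unfold Pre_partitionArray; infer_instance
def pvWitness_partitionArray : List Int × Int := ([3, 6, 1, 2, 5], 2)

def Spec_partitionArray (nums : List Int) (k : Int) (out : Int) : Prop := out = partitionArray_alt nums k
instance (nums : List Int) (k : Int) (out : Int) : Decidable (Spec_partitionArray nums k out) := by unfold Spec_partitionArray; infer_instance

-- ===== CLAIM (what is proved, stated in full; the proofs are below) =====
def Claim_equal_partitionArray : Prop := ∀ (nums : List Int) (k : Int), Dom_partitionArray nums k → Pre_partitionArray nums k → Spec_partitionArray nums k (partitionArray nums k)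

-- ===== LEMMAS AND PROOFS =====

-- A's single pass over nums splits into three independent folds.
theorem pv_fold3 (l : List Int) (s : PySem.Set Int) (m M : Int) :
    l.foldl (fun (s : PySem.Set Int × Int × Int) num =>
        (PySem.Set.add s.1 num, min s.2.1 num, max s.2.2 num)) (s, m, M)
    = (l.foldl (fun t num => PySem.Set.add t num) s,
       l.foldl min m, l.foldl max M) := by
  induction l generalizing s m M with
  | nil => rfl
  | cons x xs ih => simp [List.foldl_cons, ih]

theorem pv_foldl_min_le : ∀ (l : List Int) (a : Int), l.foldl min a ≤ a
  | [], a => le_refl a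
  | x :: xs, a => le_trans (pv_foldl_min_le xs (min a x)) (min_le_left a x)

theorem pv_foldl_min_le_mem : ∀ (l : List Int) (a x : Int), x ∈ l → l.foldl min a ≤ x
  | [], _, _, hx => by simp at hx
  | y :: ys, a, x, hx => by
    rcases List.mem_cons.mp hx with h | h
    · subst h; exact le_trans (pv_foldl_min_le ys (min a x)) (min_le_right a x)
    · exact pv_foldl_min_le_mem ys (min a y) x h

theorem pv_foldl_min_mem : ∀ (l : List Int) (a : Int), l.foldl min a = a ∨ l.foldl min a ∈ l
  | [], a => Or.inl rfl
  | x :: xs, a => by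
    rcases pv_foldl_min_mem xs (min a x) with h | h
    · rcases min_choice a x with he | he
      · exact Or.inl (by rw [List.foldl_cons, h, he])
      · exact Or.inr (by rw [List.foldl_cons, h, he]; exact List.mem_cons_self)
    · exact Or.inr (by rw [List.foldl_cons]; exact List.mem_cons_of_mem x h)

theorem pv_le_foldl_max_init : ∀ (l : List Int) (a : Int), a ≤ l.foldl max a
  | [], a => le_refl a
  | x :: xs, a => le_trans (le_max_left a x) (pv_le_foldl_max_init xs (max a x))

theorem pv_le_foldl_max : ∀ (l : List Int) (a x : Int), x ∈ l → x ≤ l.foldl max a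
  | [], _, _, hx => by simp at hx
  | y :: ys, a, x, hx => by
    rcases List.mem_cons.mp hx with h | h
    · subst h; exact le_trans (le_max_right a x) (pv_le_foldl_max_init ys (max a x))
    · exact pv_le_foldl_max ys (max a y) x h

-- the sorted distinct values are exactly the range scan filtered by membership
theorem pv_filtered_eq_sorted (nums : List Int) (m M : Int)
    (hm : ∀ x ∈ nums, m ≤ x) (hM : ∀ x ∈ nums, x ≤ M) :
    (PySem.List.pyRange m (M + 1) 1).filter
        (fun x => PySem.Set.contains (PySem.Set.ofList nums) x)
      = PySem.List.sorted (PySem.Set.ofList nums) (fun x => x) false := by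
  have hperm : ((PySem.List.pyRange m (M + 1) 1).filter
      (fun x => PySem.Set.contains (PySem.Set.ofList nums) x)).Perm
      (PySem.Set.ofList nums) := by
    refine (List.perm_ext_iff_of_nodup
      (List.Nodup.filter _ (PySem.List.nodup_pyRange_one m (M + 1)))
      (PySem.Set.nodup_ofList nums)).mpr ?_
    intro x
    simp only [List.mem_filter, PySem.List.mem_pyRange_one, PySem.Set.contains_iff,
      PySem.Set.mem_ofList]
    constructor
    · rintro ⟨_, hx⟩; exact hx
    · intro hx; exact ⟨⟨hm x hx, by have := hM x hx; omega⟩, hx⟩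
  have hpair := List.Pairwise.filter
    (fun x => PySem.Set.contains (PySem.Set.ofList nums) x)
    (PySem.List.pairwise_lt_pyRange_one m (M + 1))
  exact (PySem.List.sorted_eq_of_perm_of_pairwise_lt _ _ _ hperm hpair).symm

theorem partitionArray_spec : Claim_equal_partitionArray := by
  intro nums k _ hpre
  unfold Spec_partitionArray
  obtain ⟨n0, rest, rfl⟩ := List.exists_cons_of_ne_nil hpre
  set nums := n0 :: rest with hnums
  -- the sorted distinct values, nonempty
  set vals := PySem.List.sorted (PySem.Set.ofList nums) (fun x => x) false with hvals
  have hvne : vals ≠ [] := by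
    rw [hvals, Ne, PySem.List.sorted_eq_nil_iff]
    intro hh
    have hn0 : n0 ∈ PySem.Set.ofList nums := by
      rw [PySem.Set.mem_ofList]; exact List.mem_cons_self
    rw [hh] at hn0; simp at hn0
  obtain ⟨v0, t, hv⟩ := List.exists_cons_of_ne_nil hvne
  -- extremal facts
  set m := nums.foldl min n0 with hm
  set M := nums.foldl max n0 with hM
  have hmmem : m ∈ nums := by
    rcases pv_foldl_min_mem nums n0 with h | h
    · rw [hm, h]; exact List.mem_cons_self
    · exact h
  have hmle : ∀ x ∈ nums, m ≤ x := fun x hx => pv_foldl_min_le_mem nums n0 x hx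
  have hMge : ∀ x ∈ nums, x ≤ M := fun x hx => pv_le_foldl_max nums n0 x hx
  have hv0 : v0 = m := by
    have hv0mem : v0 ∈ nums := by
      have hmem : v0 ∈ vals := by rw [hv]; exact List.mem_cons_self
      rw [hvals, PySem.List.mem_sorted, PySem.Set.mem_ofList] at hmem
      exact hmem
    have h2 : v0 ≤ m := by
      have hmm : m ∈ PySem.Set.ofList nums := by rw [PySem.Set.mem_ofList]; exact hmmem
      have heq : PySem.List.sorted (PySem.Set.ofList nums) (fun x => x) false = v0 :: t := by
        rw [← hvals]; exact hv
      exact PySem.List.key_head_sorted_le _ _ heq m hmm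
    exact le_antisymm h2 (hmle v0 hv0mem)
  -- evaluate port A
  show partitionArray nums k = partitionArray_alt nums k
  rw [partitionArray]
  have hget : PySem.List.pyGet? nums (0 : Int) = some n0 := by
    simp [hnums, PySem.List.pyGet?, PySem.List.pyIdx?]
  rw [hget]
  simp only [pv_fold3]
  have hbuckets : nums.foldl (fun t num => PySem.Set.add t num) PySem.Set.empty
      = PySem.Set.ofList nums := rfl
  rw [hbuckets, ← hm, ← hM]
  -- flip the negated guard, fold over the filtered list
  have hstep : (fun (s : Int × Int) num =>
        if !(PySem.Set.contains (PySem.Set.ofList nums) num) then s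
        else if num - s.2 ≤ k then s else (s.1 + 1, num))
      = (fun (s : Int × Int) num =>
        if PySem.Set.contains (PySem.Set.ofList nums) num then
          (if num - s.2 ≤ k then s else (s.1 + 1, num)) else s) := by
    funext s num
    cases hc : PySem.Set.contains (PySem.Set.ofList nums) num <;> simp
  rw [hstep, PySem.List.foldl_if_eq_foldl_filter, pv_filtered_eq_sorted nums m M hmle hMge,
    ← hvals]
  -- identical greedy steps
  have hstep2 : (fun (s : Int × Int) v => if v - s.2 ≤ k then s else (s.1 + 1, v))
      = (fun (s : Int × Int) v => if v - s.2 > k then (s.1 + 1, v) else s) := by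
    funext s v
    by_cases h : v - s.2 ≤ k
    · rw [if_pos h, if_neg (not_lt.mpr h)]
    · rw [if_neg h, if_pos (lt_of_not_ge h)]
  rw [partitionArray_alt, ← hvals, hv, hstep2, hv0]
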